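-- pv_equiv track=rewrite | github.com/egorzhmaev/algorithms | алгоритмы/ЖадныеАлгоритмы/Сувениры.py | maximum_loot
-- ===== SOURCE A (Python) =====
-- def maximum_loot(W, cost):
--     if W <= 0:
--         return 0
--     m = cost.index(min(cost))
--     amount = cost[m]
--     if W >= amount:
--         value = 1
--     else:
--         return 0
--     cost.pop(m)
--     return value + maximum_loot(W - amount, cost)
-- ===== SOURCE B (Python) =====
-- def maximum_loot(W, cost):
--     # Sort once, then count the prefix of cheapest items whose cumulative
--     # cost stays within W. (Does not mutate cost, unlike A, which empties it;
--     # the equivalence is about the return value.)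
--     rem = W
--     count = 0
--     for c in sorted(cost):
--         if rem <= 0 or rem < c:
--             break
--         rem -= c
--         count += 1
--     return count
-- ===== Notes on version B (the rewrite author's own statement) =====
-- stated objective: faster
-- what changed: Replaces the recursive repeat-min-and-pop scan (a linear min+index+pop pass per item taken) with one sort followed by a single cumulative-sum prefix scan.
-- outside the precondition, e.g. on maximum_loot(5, [1, 2]): A raises ValueError, B returns 2
import Mathlib
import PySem

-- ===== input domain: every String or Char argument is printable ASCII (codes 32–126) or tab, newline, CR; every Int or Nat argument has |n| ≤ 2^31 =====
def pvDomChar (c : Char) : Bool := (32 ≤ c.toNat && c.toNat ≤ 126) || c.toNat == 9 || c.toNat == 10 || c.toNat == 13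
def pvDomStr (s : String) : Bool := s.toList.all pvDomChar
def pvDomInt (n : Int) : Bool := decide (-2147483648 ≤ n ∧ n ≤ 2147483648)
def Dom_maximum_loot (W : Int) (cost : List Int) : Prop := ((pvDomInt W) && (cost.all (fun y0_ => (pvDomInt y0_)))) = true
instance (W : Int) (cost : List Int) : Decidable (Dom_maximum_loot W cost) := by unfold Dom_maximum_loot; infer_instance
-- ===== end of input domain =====

-- B replaces A's recursive repeat-min-and-pop scan with one sort plus a single
-- cumulative-sum prefix scan (faster). A mutates `cost` in place (pops from it);
-- B does not: the equivalence proved here is about the RETURN value only.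

-- ===== PORT A =====
-- Literal port of A: min, index of first occurrence, pop at that index, recurse.
-- Where Python raises (min()/index of an empty list), the port returns 0; those
-- inputs are excluded by Pre_maximum_loot.
def maximum_loot (W : Int) (cost : List Int) : Int :=
  if W ≤ 0 then 0
  else
    match PySem.List.min? cost (fun x => x) with
    | none => 0      -- Python: ValueError (min of empty list); outside Pre_
    | some mn =>
      match PySem.List.index? cost mn with
      | none => 0    -- unreachable: min is a member
      | some m =>
        let amount := PySem.List.pyGetD cost (m : Int) 0
        if W ≥ amount then
          match h3 : PySem.List.pop? cost (m : Int) with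
          | none => 0  -- unreachable: m is a valid index
          | some r => 1 + maximum_loot (W - amount) r.2
        else 0
termination_by cost.length
decreasing_by
  have := PySem.List.length_of_pop?_eq_some cost h3
  omega

-- ===== PORT B =====
-- Port of Source B's loop over the sorted list with state (rem, count); break returns count.
def pvAltLoop (l : List Int) (rem : Int) (count : Int) : Int :=
  match l with
  | [] => count
  | c :: rest => if rem ≤ 0 ∨ rem < c then count else pvAltLoop rest (rem - c) (count + 1)

def maximum_loot_alt (W : Int) (cost : List Int) : Int :=
  pvAltLoop (PySem.List.sorted cost (fun x => x) false) W 0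

-- ===== PRECONDITION & SPEC =====
-- A raises ValueError exactly when 0 < W and sum(cost) < W (the greedy consumes
-- everything and then calls min() on the emptied list); Pre_ excludes exactly that.
def Pre_maximum_loot (W : Int) (cost : List Int) : Prop := W ≤ 0 ∨ W ≤ cost.sum
instance (W : Int) (cost : List Int) : Decidable (Pre_maximum_loot W cost) := by
  unfold Pre_maximum_loot; infer_instance

def pvWitness_maximum_loot : Int × List Int := (10, [3, 4, 5])

def Spec_maximum_loot (W : Int) (cost : List Int) (out : Int) : Prop := out = maximum_loot_alt W cost
instance (W : Int) (cost : List Int) (out : Int) : Decidable (Spec_maximum_loot W cost out) := by unfold Spec_maximum_loot; infer_instance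

-- ===== CLAIM (what is proved, stated in full; the proofs are below) =====
def Claim_equal_maximum_loot : Prop := ∀ (W : Int) (cost : List Int), Dom_maximum_loot W cost → Pre_maximum_loot W cost → Spec_maximum_loot W cost (maximum_loot W cost)

-- ===== LEMMAS AND PROOFS =====

-- The loop's count accumulator factors out.
lemma pvAltLoop_count (l : List Int) (rem count : Int) :
    pvAltLoop l rem count = count + pvAltLoop l rem 0 := by
  induction l generalizing rem count with
  | nil => simp [pvAltLoop]
  | cons c rest ih =>
    simp only [pvAltLoop]
    split_ifs with h
    · omega
    · rw [ih (rem - c) (count + 1), ih (rem - c) (0 + 1)]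
      omega

-- sorted cost starts with the min, followed by sorted(cost with that first min removed).
lemma pvSorted_cons_min (cost : List Int) (mn : Int) (m : Nat)
    (hmin : PySem.List.min? cost (fun x => x) = some mn)
    (hidx : PySem.List.index? cost mn = some m) :
    PySem.List.sorted cost (fun x => x) false
      = mn :: PySem.List.sorted (cost.eraseIdx m) (fun x => x) false := by
  obtain ⟨pre, suf, hsplit, hlen, -⟩ := (PySem.List.index?_eq_some_iff _ _ _).1 hidx
  have herase : cost.eraseIdx m = pre ++ suf := by
    subst hsplit hlen
    simp [List.eraseIdx_append_of_length_le (Nat.le_refl _)]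
  have hperm : (mn :: PySem.List.sorted (cost.eraseIdx m) (fun x => x) false).Perm cost := by
    refine List.Perm.trans (List.Perm.cons mn (PySem.List.sorted_perm _ _ _)) ?_
    rw [herase, hsplit]
    exact List.perm_middle.symm
  have hpair : (mn :: PySem.List.sorted (cost.eraseIdx m) (fun x => x) false).Pairwise (· ≤ ·) := by
    rw [List.pairwise_cons]
    refine ⟨?_, PySem.List.sorted_pairwise _ _⟩
    intro y hy
    have hy' : y ∈ cost.eraseIdx m := (PySem.List.mem_sorted _ _ _ _).1 hy
    have : y ∈ cost := by
      rw [herase] at hy'; rw [hsplit]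
      rcases List.mem_append.1 hy' with h | h
      · exact List.mem_append.2 (Or.inl h)
      · exact List.mem_append.2 (Or.inr (List.mem_cons_of_mem _ h))
    exact PySem.List.min?_isMin hmin y this
  exact PySem.List.sorted_id_eq_of_perm_of_pairwise _ _ hperm hpair

lemma pvSum_eraseIdx (cost : List Int) (mn : Int) (m : Nat)
    (hidx : PySem.List.index? cost mn = some m) :
    (cost.eraseIdx m).sum = cost.sum - mn := by
  obtain ⟨pre, suf, hsplit, hlen, -⟩ := (PySem.List.index?_eq_some_iff _ _ _).1 hidx
  subst hsplit hlen
  simp [List.eraseIdx_append_of_length_le (Nat.le_refl _)]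
  ring

lemma pvMain (n : Nat) : ∀ (cost : List Int), cost.length ≤ n → ∀ (W : Int),
    Pre_maximum_loot W cost → maximum_loot W cost = maximum_loot_alt W cost := by
  induction n with
  | zero =>
    intro cost hlen W pre
    have hc : cost = [] := List.eq_nil_of_length_eq_zero (Nat.le_zero.1 hlen)
    subst hc
    rcases pre with h | h
    · rw [maximum_loot.eq_def]; simp [maximum_loot_alt, h, PySem.List.sorted, pvAltLoop]
    · have hW : W ≤ 0 := by simpa using h
      rw [maximum_loot.eq_def]; simp [maximum_loot_alt, hW, PySem.List.sorted, pvAltLoop]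
  | succ n ih =>
    intro cost hlen W pre
    by_cases hW : W ≤ 0
    · rw [maximum_loot.eq_def]
      simp only [hW, if_true]
      unfold maximum_loot_alt
      cases h : PySem.List.sorted cost (fun x => x) false with
      | nil => simp [pvAltLoop]
      | cons c rest => simp [pvAltLoop, hW]
    · -- 0 < W, so Pre gives W ≤ sum; cost ≠ []
      have hWpos : 0 < W := by omega
      have hsum : W ≤ cost.sum := by rcases pre with h | h <;> omega
      have hne : cost ≠ [] := by
        rintro rfl; simp at hsum; omega
      obtain ⟨mn, hmin⟩ : ∃ mn, PySem.List.min? cost (fun x => x) = some mn := by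
        cases h : PySem.List.min? cost (fun x => x) with
        | none => exact absurd ((PySem.List.min?_eq_none_iff _ _).1 h) hne
        | some mn => exact ⟨mn, rfl⟩
      have hmem : mn ∈ cost := PySem.List.min?_mem hmin
      obtain ⟨m, hidx⟩ : ∃ m, PySem.List.index? cost mn = some m := by
        cases h : PySem.List.index? cost mn with
        | none => exact absurd ((PySem.List.index?_eq_none_iff _ _).1 h) (by simpa using hmem)
        | some m => exact ⟨m, rfl⟩
      obtain ⟨hm, hget, -⟩ := PySem.List.getElem_of_index?_eq_some hidx
      have hamount : PySem.List.pyGetD cost (m : Int) 0 = mn := by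
        rw [PySem.List.pyGetD_natCast]
        simp [List.getD_eq_getElem?_getD, hget, List.getElem?_eq_getElem hm]
      have hpop : PySem.List.pop? cost (m : Int) = some (cost[m], cost.eraseIdx m) :=
        PySem.List.pop?_natCast cost m hm
      have hsorted := pvSorted_cons_min cost mn m hmin hidx
      rw [maximum_loot.eq_def]
      simp only [hW, if_false, hmin, hidx, hamount]
      by_cases hfit : W ≥ mn
      · simp only [hfit, if_true]
        split
        next heq => rw [hpop] at heq; simp at heq
        next r heq =>
        rw [hpop] at heq
        cases heq
        have hrest : (cost.eraseIdx m).length ≤ n := by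
          have := List.length_eraseIdx_of_lt hm
          omega
        have hpre : Pre_maximum_loot (W - mn) (cost.eraseIdx m) := by
          rw [Pre_maximum_loot, pvSum_eraseIdx cost mn m hidx]
          omega
        rw [ih (cost.eraseIdx m) hrest (W - mn) hpre]
        unfold maximum_loot_alt
        rw [hsorted]
        simp only [pvAltLoop]
        have : ¬ (W ≤ 0 ∨ W < mn) := by omega
        rw [if_neg this, pvAltLoop_count _ (W - mn) (0 + 1)]
        omega
      · simp only [hfit, if_false]
        unfold maximum_loot_alt
        rw [hsorted]
        simp only [pvAltLoop]
        rw [if_pos (by omega)]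

-- ===== VERDICT (by name: the statement is the Claim_ definition above) =====
theorem maximum_loot_spec : Claim_equal_maximum_loot := by
  intro W cost _ pre
  unfold Spec_maximum_loot
  exact pvMain cost.length cost (Nat.le_refl _) W pre
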